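-- pv_equiv track=rewrite | github.com/mybodygurd/Learning-Progress-Tracker | app/main.py | _calc_max_min_ctg
-- ===== SOURCE A (Python) =====
-- def _calc_max_min_ctg(counts: dict) -> tuple[list | None, list | None]:
--     if not any(val != 0 for val in counts.values()):
--         return None, None
--     max_val = max(counts.values())
--     min_val = min(counts.values())
--     most = [name for name, val in counts.items() if val == max_val]
--     least = [name for name, val in counts.items() if val == min_val and name not in most]
--     most = most if most else None
--     least = least if least else None
--     return most, least
-- ===== SOURCE B (Python) =====
-- def _calc_max_min_ctg(counts: dict) -> tuple[list | None, list | None]: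
--     max_val = min_val = None
--     most = []
--     least = []
--     for name, val in counts.items():
--         if max_val is None or val > max_val:
--             max_val = val
--             most = [name]
--         elif val == max_val:
--             most.append(name)
--         if min_val is None or val < min_val:
--             min_val = val
--             least = [name]
--         elif val == min_val:
--             least.append(name)
--     if max_val is None or max_val == min_val == 0:
--         return None, None
--     if min_val == max_val:
--         return most, None
--     return most, least
-- ===== Notes on version B (the rewrite author's own statement) =====
-- stated objective: faster
-- what changed: Replaces A's five separate passes (all-zero guard scan, max scan, min scan, and two filtering comprehensions, the second with an inner 'name not in most' list scan) by one single fold maintaining running max/min together with their name lists, deciding the None cases from the final extrema.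
import Mathlib
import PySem

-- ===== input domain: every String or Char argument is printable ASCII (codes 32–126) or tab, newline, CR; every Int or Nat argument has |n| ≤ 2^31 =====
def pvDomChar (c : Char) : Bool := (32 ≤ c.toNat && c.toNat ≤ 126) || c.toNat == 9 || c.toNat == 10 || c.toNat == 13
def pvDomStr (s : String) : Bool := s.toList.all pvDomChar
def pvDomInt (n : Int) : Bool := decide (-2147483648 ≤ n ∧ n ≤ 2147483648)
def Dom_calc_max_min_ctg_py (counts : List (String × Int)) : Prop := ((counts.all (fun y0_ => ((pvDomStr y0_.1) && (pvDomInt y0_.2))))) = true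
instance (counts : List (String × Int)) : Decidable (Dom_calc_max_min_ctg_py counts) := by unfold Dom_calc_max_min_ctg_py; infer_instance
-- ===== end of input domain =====

-- B replaces A's five passes (guard scan, max, min, two filtering comprehensions) by one fold
-- maintaining running max/min with their name lists; equal return value on dicts (duplicate-free key lists).

-- ===== PORT A =====
def calc_max_min_ctg_py (counts : List (String × Int)) : Option (List String) × Option (List String) :=
  if !(counts.any fun p => !(p.2 == 0)) then (none, none)
  else
    match PySem.List.max? (counts.map Prod.snd) (fun v => v),
          PySem.List.min? (counts.map Prod.snd) (fun v => v) with
    | some maxVal, some minVal =>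
      let most := (counts.filter fun p => p.2 == maxVal).map Prod.fst
      let least := (counts.filter fun p => p.2 == minVal && !(List.contains most p.1)).map Prod.fst
      ((if most.isEmpty then none else some most),
       (if least.isEmpty then none else some least))
    | _, _ => (none, none)  -- unreachable: counts is nonempty past the guard

-- ===== PORT B =====
-- the two independent if/elif blocks of Source B's loop body
def pvStepMax (st : Option Int × List String) (p : String × Int) : Option Int × List String :=
  match st with
  | (none, _) => (some p.2, [p.1])
  | (some m, most) =>
    if p.2 > m then (some p.2, [p.1])
    else if p.2 == m then (some m, most ++ [p.1])
    else (some m, most)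

def pvStepMin (st : Option Int × List String) (p : String × Int) : Option Int × List String :=
  match st with
  | (none, _) => (some p.2, [p.1])
  | (some m, least) =>
    if p.2 < m then (some p.2, [p.1])
    else if p.2 == m then (some m, least ++ [p.1])
    else (some m, least)

def pvStep (st : (Option Int × List String) × (Option Int × List String)) (p : String × Int) :
    (Option Int × List String) × (Option Int × List String) :=
  (pvStepMax st.1 p, pvStepMin st.2 p)

def calc_max_min_ctg_py_alt (counts : List (String × Int)) : Option (List String) × Option (List String) :=
  let st := counts.foldl pvStep ((none, []), (none, []))
  match st.1.1 with
  | none => (none, none)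
  | some maxVal =>
    match st.2.1 with
    | none => (none, none)
    | some minVal =>
      if maxVal == 0 && minVal == 0 then (none, none)
      else if minVal == maxVal then (some st.1.2, none)
      else (some st.1.2, some st.2.2)

-- ===== PRECONDITION & SPEC =====
-- Pre_ excludes lists with duplicate first components: a Python dict cannot hold duplicate keys,
-- so such association lists do not correspond to any input of A.
def Pre_calc_max_min_ctg_py (counts : List (String × Int)) : Prop := (counts.map Prod.fst).Nodup
instance (counts : List (String × Int)) : Decidable (Pre_calc_max_min_ctg_py counts) := by
  unfold Pre_calc_max_min_ctg_py; infer_instance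

def pvWitness_calc_max_min_ctg_py : (List (String × Int)) := [("a", 1), ("b", 0)]

def Spec_calc_max_min_ctg_py (counts : List (String × Int)) (out : Option (List String) × Option (List String)) : Prop := out = calc_max_min_ctg_py_alt counts
instance (counts : List (String × Int)) (out : Option (List String) × Option (List String)) : Decidable (Spec_calc_max_min_ctg_py counts out) := by unfold Spec_calc_max_min_ctg_py; infer_instance

-- ===== CLAIM (what is proved, stated in full; the proofs are below) =====
def Claim_equal_calc_max_min_ctg_py : Prop := ∀ (counts : List (String × Int)), Dom_calc_max_min_ctg_py counts → Pre_calc_max_min_ctg_py counts → Spec_calc_max_min_ctg_py counts (calc_max_min_ctg_py counts)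

-- ===== LEMMAS AND PROOFS =====

theorem foldl_pvStep_proj (l : List (String × Int)) (s1 s2 : Option Int × List String) :
    l.foldl pvStep (s1, s2) = (l.foldl pvStepMax s1, l.foldl pvStepMin s2) := by
  induction l generalizing s1 s2 with
  | nil => rfl
  | cons h t ih => simp [List.foldl_cons, pvStep, ih]

theorem foldMax_char (xs : List (String × Int)) (c : String × Int) :
    (c :: xs).foldl pvStepMax (none, []) =
      (some ((xs.map Prod.snd).foldl max c.2),
       ((c :: xs).filter (fun p => p.2 == (xs.map Prod.snd).foldl max c.2)).map Prod.fst) := by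
  induction xs using List.reverseRecOn with
  | nil => simp [pvStepMax]
  | append_singleton t x ih =>
    have hM := PySem.List.le_foldl_max (t.map Prod.snd) c.2
    set M := (t.map Prod.snd).foldl max c.2 with hMdef
    have hsplit : (c :: (t ++ [x])) = (c :: t) ++ [x] := by simp
    have hnewmax : ((t ++ [x]).map Prod.snd).foldl max c.2 = max M x.2 := by
      simp [List.foldl_append, hMdef]
    have hfa : ∀ (pr : String × Int → Bool),
        List.filter pr (c :: (t ++ [x])) = List.filter pr (c :: t) ++ List.filter pr [x] := by
      intro pr; rw [hsplit, List.filter_append]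
    rw [hsplit, List.foldl_append, ih, hnewmax]
    rcases lt_trichotomy M x.2 with hlt | heq | hgt
    · have hmax : max M x.2 = x.2 := by omega
      have hfilt : List.filter (fun p => p.2 == x.2) (c :: t) = [] := by
        apply List.filter_eq_nil_iff.2
        intro p hp
        simp only [Bool.not_eq_true, beq_eq_false_iff_ne, ne_eq]
        rcases List.mem_cons.1 hp with rfl | hpt
        · omega
        · have := hM.2 p.2 (List.mem_map_of_mem hpt); omega
      rw [hmax, List.filter_append, hfilt]
      simp [pvStepMax, hlt, List.foldl_nil]
    · have hmax : max M x.2 = M := by omega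
      have hngt : ¬ (x.2 > M) := by omega
      rw [hmax, List.filter_append]
      simp [pvStepMax, heq.symm, List.filter_cons, List.filter_nil]
    · have hmax : max M x.2 = M := by omega
      have hngt : ¬ (x.2 > M) := by omega
      have hne : ¬ (x.2 = M) := by omega
      rw [hmax, List.filter_append]
      simp [pvStepMax, hngt, hne, List.filter_cons, List.filter_nil]

theorem foldMin_char (xs : List (String × Int)) (c : String × Int) :
    (c :: xs).foldl pvStepMin (none, []) =
      (some ((xs.map Prod.snd).foldl min c.2),
       ((c :: xs).filter (fun p => p.2 == (xs.map Prod.snd).foldl min c.2)).map Prod.fst) := by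
  induction xs using List.reverseRecOn with
  | nil => simp [pvStepMin]
  | append_singleton t x ih =>
    have hM := PySem.List.foldl_min_le (t.map Prod.snd) c.2
    set M := (t.map Prod.snd).foldl min c.2 with hMdef
    have hnewmin : ((t ++ [x]).map Prod.snd).foldl min c.2 = min M x.2 := by
      simp [List.foldl_append, hMdef]
    rw [show (c :: (t ++ [x])) = (c :: t) ++ [x] by simp, List.foldl_append, ih, hnewmin]
    rcases lt_trichotomy x.2 M with hlt | heq | hgt
    · have hmin : min M x.2 = x.2 := by omega
      have hfilt : List.filter (fun p => p.2 == x.2) (c :: t) = [] := by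
        apply List.filter_eq_nil_iff.2
        intro p hp
        simp only [Bool.not_eq_true, beq_eq_false_iff_ne, ne_eq]
        rcases List.mem_cons.1 hp with rfl | hpt
        · omega
        · have := hM.2 p.2 (List.mem_map_of_mem hpt); omega
      rw [hmin, List.filter_append, hfilt]
      simp [pvStepMin, hlt]
    · have hmin : min M x.2 = M := by omega
      rw [hmin, List.filter_append]
      simp [pvStepMin, heq, List.filter_cons, List.filter_nil]
    · have hmin : min M x.2 = M := by omega
      have hnlt : ¬ (x.2 < M) := by omega
      have hne : ¬ (x.2 = M) := by omega
      rw [hmin, List.filter_append]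
      simp [pvStepMin, hnlt, hne, List.filter_cons, List.filter_nil]

theorem pv_max_mem (xs : List (String × Int)) (c : String × Int) :
    ∃ p ∈ c :: xs, p.2 = (xs.map Prod.snd).foldl max c.2 := by
  rcases PySem.List.foldl_max_mem (xs.map Prod.snd) c.2 with h | h
  · exact ⟨c, List.mem_cons_self, h.symm⟩
  · rcases List.mem_map.1 h with ⟨p, hp, hpv⟩
    exact ⟨p, List.mem_cons_of_mem _ hp, hpv⟩

theorem pv_min_mem (xs : List (String × Int)) (c : String × Int) :
    ∃ p ∈ c :: xs, p.2 = (xs.map Prod.snd).foldl min c.2 := by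
  rcases PySem.List.foldl_min_mem (xs.map Prod.snd) c.2 with h | h
  · exact ⟨c, List.mem_cons_self, h.symm⟩
  · rcases List.mem_map.1 h with ⟨p, hp, hpv⟩
    exact ⟨p, List.mem_cons_of_mem _ hp, hpv⟩

theorem pv_main : ∀ (counts : List (String × Int)), (counts.map Prod.fst).Nodup →
    calc_max_min_ctg_py counts = calc_max_min_ctg_py_alt counts := by
  intro counts hpre
  match counts with
  | [] => rfl
  | c :: xs =>
    set M := (xs.map Prod.snd).foldl max c.2 with hMdef
    set m := (xs.map Prod.snd).foldl min c.2 with hmdef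
    have hMax := PySem.List.le_foldl_max (xs.map Prod.snd) c.2
    have hMin := PySem.List.foldl_min_le (xs.map Prod.snd) c.2
    have hub : ∀ p ∈ c :: xs, p.2 ≤ M := by
      intro p hp
      rcases List.mem_cons.1 hp with rfl | hpt
      · exact hMax.1
      · exact hMax.2 p.2 (List.mem_map_of_mem hpt)
    have hlb : ∀ p ∈ c :: xs, m ≤ p.2 := by
      intro p hp
      rcases List.mem_cons.1 hp with rfl | hpt
      · exact hMin.1
      · exact hMin.2 p.2 (List.mem_map_of_mem hpt)
    have hBalt : calc_max_min_ctg_py_alt (c :: xs) =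
        (if M == 0 && m == 0 then (none, none)
         else if m == M then (some (((c :: xs).filter (fun p => p.2 == M)).map Prod.fst), none)
         else (some (((c :: xs).filter (fun p => p.2 == M)).map Prod.fst),
               some (((c :: xs).filter (fun p => p.2 == m)).map Prod.fst))) := by
      simp only [calc_max_min_ctg_py_alt]
      rw [foldl_pvStep_proj, foldMax_char, foldMin_char]
    by_cases hz : ∃ p ∈ c :: xs, p.2 ≠ 0
    · -- some value nonzero
      have hany : ((c :: xs).any fun p => !(p.2 == 0)) = true := by
        rcases hz with ⟨p, hp, hpne⟩
        exact List.any_eq_true.2 ⟨p, hp, by simpa using hpne⟩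
      have hnz : ¬ (M = 0 ∧ m = 0) := by
        rintro ⟨hM0, hm0⟩
        rcases hz with ⟨p, hp, hpne⟩
        have := hub p hp; have := hlb p hp; omega
      rcases pv_max_mem xs c with ⟨pM, hpM, hpMv⟩
      rcases pv_min_mem xs c with ⟨pm, hpm, hpmv⟩
      have hmostne : ((c :: xs).filter (fun p => p.2 == M)).map Prod.fst ≠ [] := by
        have : pM ∈ (c :: xs).filter (fun p => p.2 == M) :=
          List.mem_filter.2 ⟨hpM, by simpa using hpMv⟩
        intro h
        rw [List.map_eq_nil_iff] at h
        rw [h] at this; exact absurd this (List.not_mem_nil)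
      have hA : calc_max_min_ctg_py (c :: xs) =
          (some (((c :: xs).filter (fun p => p.2 == M)).map Prod.fst),
           if (((c :: xs).filter (fun p => p.2 == m && !(List.contains (((c :: xs).filter (fun q => q.2 == M)).map Prod.fst) p.1))).map Prod.fst).isEmpty
           then none
           else some (((c :: xs).filter (fun p => p.2 == m && !(List.contains (((c :: xs).filter (fun q => q.2 == M)).map Prod.fst) p.1))).map Prod.fst)) := by
        rw [calc_max_min_ctg_py, hany]
        simp only [Bool.not_true, Bool.false_eq_true, if_false, List.map_cons,
          PySem.List.max?_id_cons, PySem.List.min?_id_cons, ← hMdef, ← hmdef,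
          List.isEmpty_iff, if_neg hmostne]
      by_cases hmM : m = M
      · -- all values equal (and nonzero): least is empty
        have hleast : ((c :: xs).filter (fun p => p.2 == m && !(List.contains (((c :: xs).filter (fun q => q.2 == M)).map Prod.fst) p.1))) = [] := by
          apply List.filter_eq_nil_iff.2
          intro p hp
          by_cases hpv : p.2 = m
          · have hpf : p ∈ (c :: xs).filter (fun q => q.2 == M) := by
              refine List.mem_filter.2 ⟨hp, ?_⟩
              simp [hpv, hmM]
            have hin : p.1 ∈ (((c :: xs).filter (fun q => q.2 == M)).map Prod.fst) :=
              List.mem_map_of_mem hpf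
            simp [hpv, hin]
          · simp [hpv]
        have hMne0 : M ≠ 0 := fun h => hnz ⟨h, hmM.trans h⟩
        have h1 : (M == 0 && m == 0) = false := by simp [hMne0]
        rw [hA, hBalt, hleast, h1]
        simp [hmM]
      · -- m ≠ M
        have hfcongr : ((c :: xs).filter (fun p => p.2 == m && !(List.contains (((c :: xs).filter (fun q => q.2 == M)).map Prod.fst) p.1)))
            = (c :: xs).filter (fun p => p.2 == m) := by
          apply List.filter_congr
          intro p hp
          by_cases hpv : p.2 = m
          · have hnotin : p.1 ∉ (((c :: xs).filter (fun q => q.2 == M)).map Prod.fst) := by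
              intro hin
              rcases List.mem_map.1 hin with ⟨q, hq, hq1⟩
              rcases List.mem_filter.1 hq with ⟨hqmem, hqv⟩
              have hsym : Symmetric (fun a b : String × Int => a.1 ≠ b.1) := fun a b h => h.symm
              have hpw : (c :: xs).Pairwise (fun a b => a.1 ≠ b.1) := List.pairwise_map.mp hpre
              have : p = q := by
                by_contra hne
                exact (hpw.forall hsym hp hqmem hne) (by rw [hq1])
              rw [this] at hpv
              simp only [beq_iff_eq] at hqv
              omega
            simp [hpv, hnotin]
          · simp [hpv]
        have hleastne : (((c :: xs).filter (fun p => p.2 == m)).map Prod.fst) ≠ [] := by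
          have : pm ∈ (c :: xs).filter (fun p => p.2 == m) :=
            List.mem_filter.2 ⟨hpm, by simpa using hpmv⟩
          intro h
          rw [List.map_eq_nil_iff] at h
          rw [h] at this; exact absurd this (List.not_mem_nil)
        have h1 : (M == 0 && m == 0) = false := by
          rcases not_and_or.mp hnz with h | h <;> simp [h]
        have h2 : (m == M) = false := by simp [hmM]
        have h3 : ((((c :: xs).filter (fun p => p.2 == m)).map Prod.fst).isEmpty) = false :=
          Bool.eq_false_iff.mpr (fun hb => hleastne (List.isEmpty_iff.mp hb))
        rw [hA, hBalt, hfcongr, h1, h2, h3]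
        simp
    · -- all values zero
      push Not at hz
      have hany : ((c :: xs).any fun p => !(p.2 == 0)) = false := by
        apply List.any_eq_false.2
        intro p hp
        simp [hz p hp]
      have hM0 : M = 0 := by
        rcases pv_max_mem xs c with ⟨p, hp, hpv⟩
        rw [hMdef, ← hpv]; exact hz p hp
      have hm0 : m = 0 := by
        rcases pv_min_mem xs c with ⟨p, hp, hpv⟩
        rw [hmdef, ← hpv]; exact hz p hp
      rw [calc_max_min_ctg_py, hany, hBalt, hM0, hm0]
      simp

-- ===== VERDICT (by name: the statement is the Claim_ definition above) =====
theorem calc_max_min_ctg_py_spec : Claim_equal_calc_max_min_ctg_py := by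
  intro counts _ hpre
  exact pv_main counts hpre
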